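-- pv_equiv track=rewrite | github.com/noah8368/OmegaZero | scripts/generate_masks.py | get_non_slider_attack_mask
-- ===== SOURCE A (Python) =====
-- __NUM_RANKS = 8
--
-- __NUM_FILES = 8
--
-- def get_bitboard(mask):
--     """Converts a 2D list "mask" into a bitboard."""
--     bitboard_bn = ""
--     for rank in range(__NUM_RANKS):
--         for file in range(__NUM_FILES):
--             if mask[rank][file] == 1:
--                 bitboard_bn = '1' + bitboard_bn
--             else:
--                 bitboard_bn = '0' + bitboard_bn
--     return int(bitboard_bn, 2)
--
-- def get_non_slider_attack_mask(rank, file, non_slider_moves):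
--     """Gets piece masks for "non-sliding" pieces (Pawn, Knight, King)
--
--     These masks represent the possible locations a non-sliding piece
--     can move to for a given square. The argument "move_dirs" is a
--     list of two element tuples denoting single move directions in
--     the format (rank, file).
--     """
--     non_slider_board = [[0 for file in range(__NUM_FILES)] for rank in
--                         range(__NUM_RANKS)]
--     for move in non_slider_moves:
--         move_rank = rank + move[0]
--         move_file = file + move[1]
--         # Detect if the move goes off the board
--         if (0 <= move_rank < __NUM_RANKS
--                 and 0 <= move_file < __NUM_FILES):
--             non_slider_board[move_rank][move_file] = 1
--     return get_bitboard(non_slider_board)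
-- ===== SOURCE B (Python) =====
-- def get_non_slider_attack_mask(rank, file, non_slider_moves):
--     """Gets piece masks for "non-sliding" pieces (Pawn, Knight, King)."""
--     bitboard = 0
--     for sq in range(63, -1, -1):
--         sq_rank, sq_file = divmod(sq, 8)
--         hit = any(rank + dr == sq_rank and file + df == sq_file
--                   for dr, df in non_slider_moves)
--         bitboard = 2 * bitboard + (1 if hit else 0)
--     return bitboard
-- ===== Notes on version B (the rewrite author's own statement) =====
-- stated objective: simpler
-- what changed: Replaced the intermediate 8x8 board, the mutation loop and the 64-cell string scan with int(.,2) by a single Horner loop over the 64 squares (MSB first) that tests each square directly against the move list with any().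
import Mathlib
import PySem

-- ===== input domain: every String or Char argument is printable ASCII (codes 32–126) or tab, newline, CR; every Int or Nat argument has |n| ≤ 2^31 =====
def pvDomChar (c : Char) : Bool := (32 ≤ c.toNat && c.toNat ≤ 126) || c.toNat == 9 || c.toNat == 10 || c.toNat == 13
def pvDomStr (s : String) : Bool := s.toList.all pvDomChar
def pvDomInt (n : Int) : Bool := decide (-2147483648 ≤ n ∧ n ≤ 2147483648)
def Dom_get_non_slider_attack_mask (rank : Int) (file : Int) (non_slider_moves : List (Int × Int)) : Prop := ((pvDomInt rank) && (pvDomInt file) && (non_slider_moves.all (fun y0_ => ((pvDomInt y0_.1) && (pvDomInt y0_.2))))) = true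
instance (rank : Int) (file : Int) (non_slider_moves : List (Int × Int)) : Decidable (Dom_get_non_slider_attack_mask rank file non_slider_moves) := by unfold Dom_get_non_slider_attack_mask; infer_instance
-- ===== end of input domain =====

-- B replaces A's intermediate 8x8 board, mutation loop and 64-cell string scan by a
-- single Horner loop over the 64 squares (simpler; not claimed faster).

-- ===== PORT A =====
-- int(bn, 2) is ported by hand as a base-2 Horner fold over the characters;
-- this is exact for nonempty strings of '0'/'1' digits, which is all this code builds.
def get_bitboard (mask : List (List Int)) : Int :=
  let bn : List Char := (PySem.List.pyRange 0 8 1).foldl (fun bn rank =>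
    (PySem.List.pyRange 0 8 1).foldl (fun bn file =>
      if PySem.List.pyGetD (PySem.List.pyGetD mask rank []) file 0 == 1 then '1' :: bn
      else '0' :: bn) bn) []
  bn.foldl (fun a c => 2 * a + (if c == '1' then 1 else 0)) 0

def get_non_slider_attack_mask (rank : Int) (file : Int) (non_slider_moves : List (Int × Int)) : Int :=
  let non_slider_board : List (List Int) :=
    (PySem.List.pyRange 0 8 1).map (fun _ => (PySem.List.pyRange 0 8 1).map (fun _ => (0 : Int)))
  let board := non_slider_moves.foldl (fun b move =>
    let move_rank := rank + move.1
    let move_file := file + move.2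
    if 0 ≤ move_rank ∧ move_rank < 8 ∧ 0 ≤ move_file ∧ move_file < 8 then
      b.modify move_rank.toNat (fun row => row.set move_file.toNat 1)
    else b) non_slider_board
  get_bitboard board

-- ===== PORT B =====
def get_non_slider_attack_mask_alt (rank : Int) (file : Int) (non_slider_moves : List (Int × Int)) : Int :=
  (PySem.List.pyRange 63 (-1) (-1)).foldl (fun bitboard sq =>
    let sq_rank := PySem.Int.floordiv sq 8
    let sq_file := PySem.Int.mod sq 8
    let hit := non_slider_moves.any (fun m => rank + m.1 == sq_rank && file + m.2 == sq_file)
    2 * bitboard + (if hit then 1 else 0)) 0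

-- ===== PRECONDITION & SPEC =====
def Spec_get_non_slider_attack_mask (rank : Int) (file : Int) (non_slider_moves : List (Int × Int)) (out : Int) : Prop := out = get_non_slider_attack_mask_alt rank file non_slider_moves
instance (rank : Int) (file : Int) (non_slider_moves : List (Int × Int)) (out : Int) : Decidable (Spec_get_non_slider_attack_mask rank file non_slider_moves out) := by unfold Spec_get_non_slider_attack_mask; infer_instance

-- ===== CLAIM (what is proved, stated in full; the proofs are below) =====
def Claim_equal_get_non_slider_attack_mask : Prop := ∀ (rank : Int) (file : Int) (non_slider_moves : List (Int × Int)), Dom_get_non_slider_attack_mask rank file non_slider_moves → Spec_get_non_slider_attack_mask rank file non_slider_moves (get_non_slider_attack_mask rank file non_slider_moves)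

-- ===== LEMMAS AND PROOFS =====

def pvShaped (b : List (List Int)) : Prop :=
  b.length = 8 ∧ ∀ row ∈ b, row.length = 8

def pvCell (b : List (List Int)) (r f : Int) : Int :=
  PySem.List.pyGetD (PySem.List.pyGetD b r []) f 0

def pvHit (rank file : Int) (ms : List (Int × Int)) (r f : Int) : Bool :=
  ms.any (fun m => rank + m.1 == r && file + m.2 == f)

theorem pvShaped_step (rank file : Int) (b : List (List Int)) (m : Int × Int)
    (hb : pvShaped b) :
    pvShaped (if 0 ≤ rank + m.1 ∧ rank + m.1 < 8 ∧ 0 ≤ file + m.2 ∧ file + m.2 < 8 then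
        b.modify (rank + m.1).toNat (fun row => row.set (file + m.2).toNat 1) else b) := by
  split_ifs with hg
  · obtain ⟨hlen, hrow⟩ := hb
    refine ⟨by simp [hlen], ?_⟩
    intro row hmem
    rw [List.mem_iff_getElem?] at hmem
    obtain ⟨j, hj⟩ := hmem
    rw [List.getElem?_modify] at hj
    rcases h : b[j]? with _ | row'
    · rw [h] at hj; simp at hj
    · rw [h] at hj
      have hmem' : row' ∈ b := List.mem_of_getElem? h
      simp only [Option.map_eq_map, Option.map_some] at hj
      split_ifs at hj
      · rw [Option.some_inj] at hj; rw [← hj, List.length_set]; exact hrow row' hmem'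
      · rw [Option.some_inj] at hj; rw [← hj]; exact hrow row' hmem'
  · exact hb

theorem pvCell_step (rank file : Int) (b : List (List Int)) (m : Int × Int)
    (hb : pvShaped b) (r f : Int) (hr0 : 0 ≤ r) (hr : r < 8) (hf0 : 0 ≤ f) (hf : f < 8) :
    pvCell (if 0 ≤ rank + m.1 ∧ rank + m.1 < 8 ∧ 0 ≤ file + m.2 ∧ file + m.2 < 8 then
        b.modify (rank + m.1).toNat (fun row => row.set (file + m.2).toNat 1) else b) r f
      = if (rank + m.1 == r && file + m.2 == f) then 1 else pvCell b r f := by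
  obtain ⟨hlen, hrow⟩ := hb
  have hrlen : r.toNat < b.length := by omega
  have hsome : b[r.toNat]? = some b[r.toNat] := List.getElem?_eq_getElem hrlen
  by_cases hg : 0 ≤ rank + m.1 ∧ rank + m.1 < 8 ∧ 0 ≤ file + m.2 ∧ file + m.2 < 8
  · rw [if_pos hg]
    obtain ⟨h1, h2, h3, h4⟩ := hg
    unfold pvCell
    rw [PySem.List.pyGetD_of_nonneg _ _ hr0, List.getD_eq_getElem?_getD, List.getElem?_modify,
        hsome]
    simp only [Option.map_eq_map, Option.map_some, Option.getD_some]
    by_cases hreq : rank + m.1 = r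
    · rw [if_pos (by omega : (rank + m.1).toNat = r.toNat)]
      rw [PySem.List.pyGetD_of_nonneg _ _ hf0, List.getD_eq_getElem?_getD, List.getElem?_set]
      have hrowlen : b[r.toNat].length = 8 := hrow _ (List.getElem_mem hrlen)
      by_cases hfeq : file + m.2 = f
      · rw [if_pos (by omega : (file + m.2).toNat = f.toNat), if_pos (by omega)]
        simp [hreq, hfeq]
      · rw [if_neg (by omega : ¬ (file + m.2).toNat = f.toNat)]
        simp [hfeq, PySem.List.pyGetD_of_nonneg _ _ hr0,
          PySem.List.pyGetD_of_nonneg _ _ hf0, List.getD_eq_getElem?_getD, hsome]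
    · rw [if_neg (by omega : ¬ (rank + m.1).toNat = r.toNat)]
      simp [hreq, PySem.List.pyGetD_of_nonneg _ _ hr0, List.getD_eq_getElem?_getD, hsome]
  · rw [if_neg hg]
    have hc : (rank + m.1 == r && file + m.2 == f) = false := by
      by_contra h
      simp only [Bool.not_eq_false, Bool.and_eq_true, beq_iff_eq] at h
      omega
    rw [hc]
    simp

theorem pvCell_fold (rank file : Int) (ms : List (Int × Int)) (b : List (List Int))
    (hb : pvShaped b) (r f : Int) (hr0 : 0 ≤ r) (hr : r < 8) (hf0 : 0 ≤ f) (hf : f < 8) :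
    pvCell (ms.foldl (fun b move =>
        if 0 ≤ rank + move.1 ∧ rank + move.1 < 8 ∧ 0 ≤ file + move.2 ∧ file + move.2 < 8 then
          b.modify (rank + move.1).toNat (fun row => row.set (file + move.2).toNat 1)
        else b) b) r f
      = if pvHit rank file ms r f then 1 else pvCell b r f := by
  induction ms generalizing b with
  | nil => simp [pvHit]
  | cons m ms ih =>
    rw [List.foldl_cons, ih _ (pvShaped_step rank file b m hb),
        pvCell_step rank file b m hb r f hr0 hr hf0 hf]
    simp only [pvHit, List.any_cons]
    have hswap : ∀ (x y : Bool) (u v : Int),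
        (if y then u else if x then u else v) = (if (x || y) then u else v) := by
      intro x y u v; cases x <;> cases y <;> simp
    exact hswap _ _ _ _

theorem pvBuild_one (g : Int → Char) (L : List Int) (s0 : List Char) :
    L.foldl (fun s x => g x :: s) s0 = (L.map g).reverse ++ s0 := by
  induction L generalizing s0 with
  | nil => simp
  | cons x L ih => simp [ih]

theorem pvBuild_two (e : Int → Int → Char) (R F : List Int) (s0 : List Char) :
    R.foldl (fun s r => F.foldl (fun s f => e r f :: s) s) s0
      = (R.flatMap (fun r => F.map (e r))).reverse ++ s0 := by
  induction R generalizing s0 with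
  | nil => simp
  | cons r R ih =>
    rw [List.foldl_cons, pvBuild_one, ih]
    simp [List.flatMap_cons, List.reverse_append, List.append_assoc]

theorem pvCharIf (h : Bool) : ((if h then '1' else '0') == '1') = h := by
  cases h <;> rfl

theorem pvCell_board0 (r f : Int) (hr0 : 0 ≤ r) (hr : r < 8) (hf0 : 0 ≤ f) (hf : f < 8) :
    pvCell ((PySem.List.pyRange 0 8 1).map
      (fun _ => (PySem.List.pyRange 0 8 1).map (fun _ => (0 : Int)))) r f = 0 := by
  interval_cases r <;> interval_cases f <;> rfl

theorem pvRange_countdown :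
    PySem.List.pyRange 63 (-1) (-1) = (PySem.List.pyRange 0 64 1).reverse := by decide

theorem main_thm : ∀ (rank file : Int) (ms : List (Int × Int)),
    get_non_slider_attack_mask rank file ms = get_non_slider_attack_mask_alt rank file ms := by
  intro rank file ms
  have hsh0 : pvShaped ((PySem.List.pyRange 0 8 1).map
      (fun _ => (PySem.List.pyRange 0 8 1).map (fun _ => (0 : Int)))) := by
    unfold pvShaped; decide
  have hA : get_non_slider_attack_mask rank file ms
      = get_bitboard (ms.foldl (fun b move =>
          if 0 ≤ rank + move.1 ∧ rank + move.1 < 8 ∧ 0 ≤ file + move.2 ∧ file + move.2 < 8 then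
            b.modify (rank + move.1).toNat (fun row => row.set (file + move.2).toNat 1)
          else b) ((PySem.List.pyRange 0 8 1).map
            (fun _ => (PySem.List.pyRange 0 8 1).map (fun _ => (0 : Int))))) := rfl
  rw [hA]
  have hcell : ∀ r f : Int, 0 ≤ r → r < 8 → 0 ≤ f → f < 8 →
      PySem.List.pyGetD (PySem.List.pyGetD (ms.foldl (fun b move =>
          if 0 ≤ rank + move.1 ∧ rank + move.1 < 8 ∧ 0 ≤ file + move.2 ∧ file + move.2 < 8 then
            b.modify (rank + move.1).toNat (fun row => row.set (file + move.2).toNat 1)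
          else b) ((PySem.List.pyRange 0 8 1).map
            (fun _ => (PySem.List.pyRange 0 8 1).map (fun _ => (0 : Int))))) r []) f 0
        = if pvHit rank file ms r f then 1 else 0 := by
    intro r f h1 h2 h3 h4
    have hstep := pvCell_fold rank file ms _ hsh0 r f h1 h2 h3 h4
    have h0 := pvCell_board0 r f h1 h2 h3 h4
    unfold pvCell at hstep h0
    rw [hstep, h0]
  unfold get_bitboard
  have hform : (PySem.List.pyRange 0 8 1).foldl (fun bn rank_1 =>
      (PySem.List.pyRange 0 8 1).foldl (fun bn file_1 =>
        if PySem.List.pyGetD (PySem.List.pyGetD (ms.foldl (fun b move =>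
          if 0 ≤ rank + move.1 ∧ rank + move.1 < 8 ∧ 0 ≤ file + move.2 ∧ file + move.2 < 8 then
            b.modify (rank + move.1).toNat (fun row => row.set (file + move.2).toNat 1)
          else b) ((PySem.List.pyRange 0 8 1).map
            (fun _ => (PySem.List.pyRange 0 8 1).map (fun _ => (0 : Int))))) rank_1 []) file_1 0 == 1
        then '1' :: bn else '0' :: bn) bn) ([] : List Char)
      = (PySem.List.pyRange 0 8 1).foldl (fun bn r =>
          (PySem.List.pyRange 0 8 1).foldl (fun bn f =>
            (if pvHit rank file ms r f then '1' else '0') :: bn) bn) [] := by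
    apply PySem.List.foldl_congr_mem
    intro acc r hrmem
    apply PySem.List.foldl_congr_mem
    intro acc2 f hfmem
    rw [PySem.List.mem_pyRange_one] at hrmem hfmem
    rw [hcell r f hrmem.1 hrmem.2 hfmem.1 hfmem.2]
    cases pvHit rank file ms r f <;> simp
  simp only []
  rw [hform, pvBuild_two (fun r f => if pvHit rank file ms r f then '1' else '0'), List.append_nil]
  have hpairs : (PySem.List.pyRange 0 8 1).flatMap
      (fun r => (PySem.List.pyRange 0 8 1).map
        ((fun r f => if pvHit rank file ms r f then '1' else '0') r))
      = (PySem.List.pyRange 0 64 1).map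
          (fun sq => if pvHit rank file ms (PySem.Int.floordiv sq 8) (PySem.Int.mod sq 8)
                     then '1' else '0') := by rfl
  rw [hpairs, ← List.map_reverse, List.foldl_map]
  simp only [pvCharIf]
  show _ = get_non_slider_attack_mask_alt rank file ms
  unfold get_non_slider_attack_mask_alt
  rw [pvRange_countdown]
  rfl

-- ===== VERDICT (by name: the statement is the Claim_ definition above) =====
theorem get_non_slider_attack_mask_spec : Claim_equal_get_non_slider_attack_mask :=
  fun rank file non_slider_moves _ => main_thm rank file non_slider_moves
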